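-- pv_equiv track=rewrite | github.com/pypi-data/pypi-mirror-271 | packages/subproptools/subproptools-0.4.3-py3-none-any.whl/subproptools/qtaim_extract.py | _search_str
-- ===== SOURCE A (Python) =====
-- def _search_str(
--     linesObj: list[str], word: str, searchStart: int = 0, ignore: int = 0
-- ) -> int:
--     """Given lines of file, return line that word is on. or -1 if not found"""
--     wordLine = -1  # will return -1 if string not found
--     for ln_num, line in enumerate(linesObj):  # iterate over lines
--         if line.find(word) > -1 and linesObj.index(line) >= searchStart:
--             if ignore == 0:
--                 wordLine = ln_num
--                 break
--             ignore = ignore - 1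
--     return wordLine
-- ===== SOURCE B (Python) =====
-- def _search_str(
--     linesObj: list[str], word: str, searchStart: int = 0, ignore: int = 0
-- ) -> int:
--     """Collect all qualifying line numbers once, then pick the ignore-th."""
--     matches = [
--         ln
--         for ln, line in enumerate(linesObj)
--         if line.find(word) > -1 and linesObj.index(line) >= searchStart
--     ]
--     if 0 <= ignore < len(matches):
--         return matches[ignore]
--     return -1
-- ===== Notes on version B (the rewrite author's own statement) =====
-- stated objective: alternative
-- what changed: A's single scan with a mutable skip counter and break is replaced by collecting all qualifying line numbers in one comprehension and then returning matches[ignore] if 0 <= ignore < len(matches) else -1.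
import Mathlib
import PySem

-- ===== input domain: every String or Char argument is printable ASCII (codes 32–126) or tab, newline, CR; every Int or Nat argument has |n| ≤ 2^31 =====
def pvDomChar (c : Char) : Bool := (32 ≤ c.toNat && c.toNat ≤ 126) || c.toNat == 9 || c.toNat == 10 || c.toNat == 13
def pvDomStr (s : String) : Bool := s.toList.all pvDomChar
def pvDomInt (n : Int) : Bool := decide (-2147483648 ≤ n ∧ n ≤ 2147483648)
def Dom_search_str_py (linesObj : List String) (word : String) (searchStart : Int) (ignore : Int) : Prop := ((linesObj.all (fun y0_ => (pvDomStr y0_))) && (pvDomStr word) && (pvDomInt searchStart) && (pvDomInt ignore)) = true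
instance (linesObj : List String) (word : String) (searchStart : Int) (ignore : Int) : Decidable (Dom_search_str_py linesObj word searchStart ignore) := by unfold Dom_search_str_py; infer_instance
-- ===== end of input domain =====

-- B replaces A's scan-with-skip-counter-and-break by "collect all qualifying line numbers, then index the ignore-th" (objective: alternative decomposition; same cost).

-- the shared filter condition both Pythons write literally: line.find(word) > -1 and linesObj.index(line) >= searchStart
def pvCond (linesObj : List String) (word : String) (searchStart : Int) (line : String) : Bool :=
  decide (PySem.Str.find line word > -1) &&
    (match PySem.List.index? linesObj line with
     | some i => decide (searchStart ≤ (i : Int))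
     | none => false)   -- unreachable in both programs: line is drawn from linesObj

-- ===== PORT A =====
-- A's for-loop with the mutable skip counter `ignore` and `break` as structural recursion over the enumerated lines
def pvLoopA (linesObj : List String) (word : String) (searchStart : Int) :
    List (Int × String) → Int → Int
  | [], _ => -1
  | (ln, line) :: rest, ig =>
    if pvCond linesObj word searchStart line then
      if ig = 0 then ln else pvLoopA linesObj word searchStart rest (ig - 1)
    else pvLoopA linesObj word searchStart rest ig

def search_str_py (linesObj : List String) (word : String) (searchStart : Int) (ignore : Int) : Int :=
  pvLoopA linesObj word searchStart (PySem.List.enumerate linesObj 0) ignore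

-- ===== PORT B =====
def search_str_py_alt (linesObj : List String) (word : String) (searchStart : Int) (ignore : Int) : Int :=
  let ms := (PySem.List.enumerate linesObj 0).filterMap
    (fun p => if pvCond linesObj word searchStart p.2 then some p.1 else none)
  if 0 ≤ ignore ∧ ignore < (ms.length : Int) then ms.getD ignore.toNat (-1) else -1

-- ===== PRECONDITION & SPEC =====
def Spec_search_str_py (linesObj : List String) (word : String) (searchStart : Int) (ignore : Int) (out : Int) : Prop := out = search_str_py_alt linesObj word searchStart ignore
instance (linesObj : List String) (word : String) (searchStart : Int) (ignore : Int) (out : Int) : Decidable (Spec_search_str_py linesObj word searchStart ignore out) := by unfold Spec_search_str_py; infer_instance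

-- ===== CLAIM (what is proved, stated in full; the proofs are below) =====
def Claim_equal_search_str_py : Prop := ∀ (linesObj : List String) (word : String) (searchStart : Int) (ignore : Int), Dom_search_str_py linesObj word searchStart ignore → Spec_search_str_py linesObj word searchStart ignore (search_str_py linesObj word searchStart ignore)

-- ===== LEMMAS AND PROOFS =====

-- the loop with skip counter ig returns the ig-th element of the filtered list (or -1)
theorem pvLoopA_eq_filter (linesObj : List String) (word : String) (searchStart : Int) :
    ∀ (es : List (Int × String)) (ig : Int),
      pvLoopA linesObj word searchStart es ig =
        (if 0 ≤ ig ∧ ig < ((es.filterMap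
            (fun p => if pvCond linesObj word searchStart p.2 then some p.1 else none)).length : Int)
         then (es.filterMap
            (fun p => if pvCond linesObj word searchStart p.2 then some p.1 else none)).getD ig.toNat (-1)
         else -1) := by
  intro es
  induction es with
  | nil => intro ig; simp [pvLoopA]
  | cons p rest ih =>
    intro ig
    obtain ⟨ln, line⟩ := p
    by_cases hc : pvCond linesObj word searchStart line
    · simp only [pvLoopA, hc, if_pos, List.filterMap_cons]
      set msr := rest.filterMap
          (fun p => if pvCond linesObj word searchStart p.2 then some p.1 else none) with hms
      by_cases h0 : ig = 0
      · subst h0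
        have hco : (0 : Int) ≤ 0 ∧ (0 : Int) < ((ln :: msr).length : Int) := by
          constructor
          · omega
          · simp only [List.length_cons]; push_cast; omega
        rw [if_pos hco]
        rfl
      · simp only [h0, if_false, ih (ig - 1)]
        simp only [List.length_cons, List.getD_eq_getElem?_getD]
        push_cast
        by_cases hlt : 0 ≤ ig - 1 ∧ ig - 1 < ((msr.length : Int))
        · have hig : 0 ≤ ig ∧ ig < (msr.length : Int) + 1 := by omega
          rw [if_pos hlt, if_pos hig]
          have htn : ig.toNat = (ig - 1).toNat + 1 := by omega
          rw [htn, List.getElem?_cons_succ]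
        · have hig : ¬ (0 ≤ ig ∧ ig < (msr.length : Int) + 1) := by omega
          rw [if_neg hlt, if_neg hig]
    · simp only [pvLoopA, hc]
      have : (if pvCond linesObj word searchStart line then some ln else none) = none := by
        simp [hc]
      simp only [List.filterMap_cons, this]
      exact ih ig

-- ===== VERDICT (by name: the statement is the Claim_ definition above) =====
theorem search_str_py_spec : Claim_equal_search_str_py := by
  intro linesObj word searchStart ignore _
  show search_str_py linesObj word searchStart ignore = search_str_py_alt linesObj word searchStart ignore
  unfold search_str_py search_str_py_alt
  exact pvLoopA_eq_filter linesObj word searchStart (PySem.List.enumerate linesObj 0) ignore
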